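-- pv_equiv track=rewrite | github.com/swrookie/coding-practice | programmers/level0/옹알이 (1)/solution.py | solution
-- ===== SOURCE A (Python) =====
-- def solution(babbling):
--     answer = 0
--
--     possibles = ["aya", "ye", "woo", "ma"]  # 목록
--     N = len(possibles)  # 목록 개수
--     result = []  # 결과들
--     temp_result = []  # 임시 연산 결과
--     visited = [False] * N  # 백트래킹 추적
--
--     # 백트래킹 순열
--     def permutation(N, M, depth):
--         if depth == M:
--             temp = "".join([r for r in temp_result])
--             result.append(temp)
--             return
--
--         for i in range(N):
--             if visited[i] is False:
--                 visited[i] = True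
--                 temp_result[depth] = possibles[i]
--                 permutation(N, M, depth + 1)
--                 visited[i] = False  # 백트래킹 추적 안하면 중복 허용
--
--     for i in range(1, N + 1):
--         temp_result = [0] * i
--         permutation(N, i, 0)
--
--     for babble in babbling:
--         if babble in result:
--             answer += 1
--
--     return answer
-- ===== SOURCE B (Python) =====
-- def solution(babbling):
--     WORDS = ["aya", "ye", "woo", "ma"]
--
--     def ok(s):
--         if not s:
--             return False
--         remaining = list(WORDS)
--         i = 0
--         while i < len(s):
--             for w in remaining:
--                 if s.startswith(w, i):
--                     remaining.remove(w)
--                     i += len(w)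
--                     break
--             else:
--                 return False
--         return True
--
--     return sum(ok(b) for b in babbling)
-- ===== Notes on version B (the rewrite author's own statement) =====
-- stated objective: alternative
-- what changed: A enumerates all 64 concatenations of distinct-word permutations by backtracking and tests each babbling for membership in that list; B instead tokenizes each babbling left-to-right against the four words (which have pairwise-distinct first letters, so parsing is deterministic), removing each matched word from the remaining set, and counts it if the whole non-empty string is consumed.
import Mathlib
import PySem

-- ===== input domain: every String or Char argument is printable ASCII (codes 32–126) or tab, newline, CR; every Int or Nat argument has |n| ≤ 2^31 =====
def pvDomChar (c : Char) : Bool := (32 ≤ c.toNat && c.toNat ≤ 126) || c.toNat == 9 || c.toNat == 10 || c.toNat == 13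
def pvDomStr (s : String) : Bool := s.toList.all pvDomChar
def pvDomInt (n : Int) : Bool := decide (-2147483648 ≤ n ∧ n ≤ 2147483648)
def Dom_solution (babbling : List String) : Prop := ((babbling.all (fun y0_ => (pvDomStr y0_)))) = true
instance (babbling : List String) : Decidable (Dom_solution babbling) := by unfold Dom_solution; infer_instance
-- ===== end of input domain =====

-- B replaces A's "generate all 64 distinct-word concatenations by backtracking, then test
-- membership" by a single left-to-right greedy tokenizer over the four words that tracks which
-- words are still unused (objective: alternative algorithm; equivalence is the theorem below).

-- ===== PORT A =====
-- A's backtracking 'permutation': Python mutates visited / temp_result / result through the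
-- closure; ported by threading the triple (visited, temp_result, result) through the recursion.
-- 'fuel' only makes the recursion terminate; every call has fuel = M - depth, so the fuel-0
-- branch is unreachable (Python recurses exactly until depth == M).
def pvPermutation (possibles : List String) (N M : Nat) :
    Nat → Nat → List Bool × List String × List String → List Bool × List String × List String
  | fuel, depth, (visited, temp, result) =>
    if depth == M then
      -- result.append("".join([r for r in temp_result]))
      (visited, temp, result ++ [PySem.Str.join "" (temp.map (fun r => r))])
    else
      match fuel with
      | 0 => (visited, temp, result)  -- unreachable (fuel = M - depth)
      | fuel + 1 =>
        (List.range N).foldl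
          (fun st i =>
            if st.1.getD i true == false then
              let vis := st.1.set i true
              let tmp := st.2.1.set depth (possibles.getD i "")
              let st' := pvPermutation possibles N M fuel (depth + 1) (vis, tmp, st.2.2)
              (st'.1.set i false, st'.2.1, st'.2.2)
            else st)
          (visited, temp, result)

-- the 'result' list after the 'for i in range(1, N + 1)' loop (a closed computation)
def pvResultA : List String :=
  let possibles := ["aya", "ye", "woo", "ma"]
  let N := possibles.length
  let st :=
    (PySem.List.pyRange 1 (N + 1) 1).foldl
      (fun st i =>
        -- temp_result = [0] * i  (Python ints, always overwritten before join reads them;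
        -- represented by the placeholder string "0")
        pvPermutation possibles N i.toNat i.toNat 0
          (st.1, List.replicate i.toNat "0", st.2.2))
      (List.replicate N false, [], [])
  st.2.2

def solution (babbling : List String) : Int :=
  babbling.foldl (fun answer babble => if pvResultA.contains babble then answer + 1 else answer) 0

-- ===== PORT B =====
def pvWords : List (List Char) := [['a', 'y', 'a'], ['y', 'e'], ['w', 'o', 'o'], ['m', 'a']]

-- the while-loop of Source B's ok(): scan 'remaining' for the first word that is a prefix of the
-- rest of the string; consume it and drop it from 'remaining', else fail.  'fuel' only bounds
-- the recursion: it is called with fuel = remaining.length, and each step shrinks 'remaining'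
-- by one, so the fuel-0/some branch is unreachable.
def pvOkLoop : Nat → List (List Char) → List Char → Bool
  | fuel, remaining, s =>
    if s = [] then true
    else
      match remaining.find? (fun w => w.isPrefixOf s) with
      | some w =>
        match fuel with
        | 0 => false  -- unreachable
        | fuel + 1 => pvOkLoop fuel (remaining.erase w) (List.drop w.length s)
      | none => false

def pvOk (s : String) : Bool :=
  if s.toList = [] then false else pvOkLoop pvWords.length pvWords s.toList

def solution_alt (babbling : List String) : Int :=
  (babbling.countP (fun b => pvOk b) : Int)

-- ===== PRECONDITION & SPEC =====
def Spec_solution (babbling : List String) (out : Int) : Prop := out = solution_alt babbling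
instance (babbling : List String) (out : Int) : Decidable (Spec_solution babbling out) := by unfold Spec_solution; infer_instance

-- ===== CLAIM (what is proved, stated in full; the proofs are below) =====
def Claim_equal_solution : Prop := ∀ (babbling : List String), Dom_solution babbling → Spec_solution babbling (solution babbling)

-- ===== LEMMAS AND PROOFS =====

-- all concatenations of sequences of pairwise-distinct words drawn from 'avail' (incl. the
-- empty one); fuel-structural, used with fuel = avail.length
def pvGenF : Nat → List (List Char) → List (List Char)
  | 0, _ => [[]]
  | fuel + 1, avail =>
    [] :: avail.flatMap (fun w => (pvGenF fuel (avail.erase w)).map (fun y => w ++ y))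

theorem mem_pvGenF_succ {fuel : Nat} {avail : List (List Char)} {x : List Char} :
    x ∈ pvGenF (fuel + 1) avail ↔
      x = [] ∨ ∃ w ∈ avail, ∃ y ∈ pvGenF fuel (avail.erase w), x = w ++ y := by
  simp [pvGenF, List.mem_flatMap, eq_comm]

-- invariant of Source B's word list: nonempty words with pairwise distinct first letters
def pvInv (r : List (List Char)) : Prop :=
  (∀ w ∈ r, w ≠ []) ∧ r.Pairwise (fun u v => u.head? ≠ v.head?)

theorem pvInv_erase {r : List (List Char)} (h : pvInv r) (w : List Char) : pvInv (r.erase w) :=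
  ⟨fun u hu => h.1 u ((List.erase_sublist).mem hu),
   List.Pairwise.sublist List.erase_sublist h.2⟩

theorem pvOkLoop_mem_gen {fuel : Nat} {r : List (List Char)} {s : List Char}
    (hf : r.length = fuel) (h : pvOkLoop fuel r s = true) : s ∈ pvGenF fuel r := by
  induction fuel generalizing r s with
  | zero =>
    have hr : r = [] := List.length_eq_zero_iff.mp hf
    subst hr
    rw [pvOkLoop] at h
    by_cases hs : s = []
    · subst hs; simp [pvGenF]
    · simp [hs, List.find?] at h
  | succ fuel ih =>
    rw [pvOkLoop] at h
    by_cases hs : s = []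
    · subst hs; exact mem_pvGenF_succ.mpr (Or.inl rfl)
    · rw [if_neg hs] at h
      cases hfind : r.find? (fun w => w.isPrefixOf s) with
      | none => rw [hfind] at h; exact absurd h (by simp)
      | some w =>
        rw [hfind] at h
        have h : pvOkLoop fuel (r.erase w) (List.drop w.length s) = true := h
        have hw := List.mem_of_find?_eq_some hfind
        have hp : w.isPrefixOf s = true := by
          have := List.find?_some (p := fun u => List.isPrefixOf u s) hfind
          simpa using this
        have hpre : w <+: s := List.isPrefixOf_iff_prefix.mp hp
        have hlen : (r.erase w).length = fuel := by
          rw [List.length_erase_of_mem hw, hf]; omega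
        have hmem := ih hlen h
        refine mem_pvGenF_succ.mpr (Or.inr ⟨w, hw, _, hmem, ?_⟩)
        obtain ⟨t, rfl⟩ := hpre
        rw [List.drop_left]

theorem pvFind_eq_some {r : List (List Char)} {w y : List Char}
    (hinv : pvInv r) (hw : w ∈ r) :
    r.find? (fun u => u.isPrefixOf (w ++ y)) = some w := by
  induction r with
  | nil => cases hw
  | cons u rest ih =>
    rcases List.mem_cons.mp hw with rfl | hw'
    · simp [List.isPrefixOf_iff_prefix, List.prefix_append]
    · have hu : u ≠ [] := hinv.1 u (List.mem_cons_self ..)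
      have hwne : w ≠ [] := hinv.1 w hw
      have hhead : u.head? ≠ w.head? := (List.pairwise_cons.mp hinv.2).1 w hw'
      have hfalse : u.isPrefixOf (w ++ y) = false := by
        by_contra hc
        rw [Bool.not_eq_false] at hc
        obtain ⟨t, ht⟩ := List.isPrefixOf_iff_prefix.mp hc
        cases u with
        | nil => exact hu rfl
        | cons a u' =>
          cases w with
          | nil => exact hwne rfl
          | cons b w' =>
            simp only [List.cons_append, List.cons.injEq] at ht
            exact hhead (by simp [List.head?, ht.1])
      rw [List.find?_cons, hfalse]
      exact ih ⟨fun v hv => hinv.1 v (List.mem_cons_of_mem _ hv),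
        (List.pairwise_cons.mp hinv.2).2⟩ hw'

theorem mem_gen_pvOkLoop {fuel : Nat} {r : List (List Char)} {s : List Char}
    (hf : r.length = fuel) (hinv : pvInv r) (h : s ∈ pvGenF fuel r) :
    pvOkLoop fuel r s = true := by
  induction fuel generalizing r s with
  | zero =>
    have hs : s = [] := by simpa [pvGenF] using h
    subst hs; rw [pvOkLoop]; simp
  | succ fuel ih =>
    rcases mem_pvGenF_succ.mp h with rfl | ⟨w, hw, y, hy, rfl⟩
    · rw [pvOkLoop]; simp
    · have hwne : w ≠ [] := hinv.1 w hw
      have hne : w ++ y ≠ [] := by simp [hwne]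
      rw [pvOkLoop, if_neg hne, pvFind_eq_some hinv hw]
      show pvOkLoop fuel (r.erase w) (List.drop w.length (w ++ y)) = true
      rw [List.drop_left]
      exact ih (by rw [List.length_erase_of_mem hw, hf]; omega) (pvInv_erase hinv w) hy

set_option maxRecDepth 20000 in
-- the finite bridge between A's generated list and the grammar pvGenF (decidable inclusions)
theorem pvBridge :
    (∀ t ∈ pvResultA, t.toList ∈ pvGenF 4 pvWords ∧ t.toList ≠ []) ∧
    (∀ x ∈ pvGenF 4 pvWords, x = [] ∨ ∃ t ∈ pvResultA, t.toList = x) := by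
  decide

theorem pvInv_words : pvInv pvWords := by
  constructor
  · decide
  · decide

theorem contains_eq_pvOk (b : String) : pvResultA.contains b = pvOk b := by
  have hmem : b ∈ pvResultA ↔ (b.toList ≠ [] ∧ b.toList ∈ pvGenF 4 pvWords) := by
    constructor
    · intro hb
      exact ⟨(pvBridge.1 b hb).2, (pvBridge.1 b hb).1⟩
    · rintro ⟨hne, hg⟩
      rcases pvBridge.2 _ hg with h0 | ⟨t, ht, hts⟩
      · exact absurd h0 hne
      · exact (String.ext hts : t = b) ▸ ht
  have hok : pvOk b = true ↔ (b.toList ≠ [] ∧ b.toList ∈ pvGenF 4 pvWords) := by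
    unfold pvOk
    by_cases h0 : b.toList = []
    · simp [h0]
    · simp only [h0]
      constructor
      · intro h; exact ⟨h0, pvOkLoop_mem_gen (by decide) h⟩
      · intro h; exact mem_gen_pvOkLoop (by decide) pvInv_words h.2
  have : pvResultA.contains b = true ↔ pvOk b = true := by
    rw [List.contains_iff_mem, hmem, hok]
  exact Bool.coe_iff_coe.mp this

-- ===== VERDICT (by name: the statement is the Claim_ definition above) =====
theorem solution_spec : Claim_equal_solution := by
  intro babbling _
  unfold Spec_solution solution solution_alt
  rw [PySem.List.foldl_count_if (fun b => pvResultA.contains b) babbling 0]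
  simp only [contains_eq_pvOk]
  simp
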